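-- pv_equiv track=rewrite | github.com/Termite1/MOF_Pore_Calculator | MOF5_Index_Identifiers.py | identifyMOF5Index
-- ===== SOURCE A (Python) =====
-- def identifyMOF5Index(frame, index):
--     '''
--     If given an index from a properly bounded MOF-5 frame (-11 --> 11 in x,y, > 28 or 30? in z)
--     returns what part of the molecular structure the index atom is a part of.
--
--     Parameters
--     ----------
--     frame : int
--         Frame index is from. Function only definitly works from frames 111-161 right now
--     index : int
--         Index of atom being described.
--
--     Returns
--     -------
--     String description of atom location in MOF structure.
--
--     '''
--
--     if frame <= 121:
--
--         #Frames 111-121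
--
--         Cap1_Stalk = ['Cap1_Stalk', 3, 27, 138, 151]
--         Cap1_Leaf_A = ['Cap1_Leaf_A', 47, 113, 117, 118, 119, 120, 258, 259, 260, 261, 262]
--         Cap1_Leaf_B = ['Cap1_Leaf_B', 46, 111, 112, 114, 115, 116, 253, 254, 255, 256, 257]
--         Cap1_Leaf_C = ['Cap1_Leaf_C', 48, 110, 121, 122, 123, 124, 263, 264, 265, 266, 267]
--         M_Cluster_1 = ['M_Cluster_1', 5, 9, 19, 126, 130, 134, 141, 148, 160, 168, 177, 181, 185, 191]
--
--         Cap2_Stalk = ['Cap2_Stalk', 1, 25, 140, 152]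
--         Cap2_Leaf_A = ['Cap2_Leaf_A', 41, 83, 87, 88, 89, 90, 229, 230, 231, 232]
--         Cap2_Leaf_B = ['Cap2_Leaf_B', 40, 81, 82, 84, 85, 86, 224, 225, 226, 227, 228]
--         Cap2_Leaf_C = ['Cap2_Leaf_C', 42, 80, 91, 92, 93, 94, 233, 234, 235, 236, 237]
--         M_Cluster_2 = ['M_Cluster_2', 6, 8, 17, 127, 131, 133, 143, 145, 158, 167, 180, 182, 187, 189]
--
--         Cap3_Stalk = ['Cap3_Stalk', 0, 24, 139, 150]
--         Cap3_Leaf_A = ['Cap3_Leaf_A', 39, 65, 76, 77, 78, 79, 219, 220, 221, 222, 223]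
--         Cap3_Leaf_B = ['Cap3_Leaf_B', 38, 68, 72, 73, 74, 75, 214, 215, 216, 217, 218]
--         Cap3_Leaf_C = ['Cap3_Leaf_C', 37, 66, 67, 69, 70, 71, 209, 210, 211, 212, 213]
--         M_Cluster_3 = ['M_Cluster_3', 4, 11, 16, 125, 129, 136, 142, 146, 157, 165, 178, 183, 188, 190]
--
--         Cap4_Stalk = ['Cap4_Stalk', 2, 26, 137, 149]
--         Cap4_Leaf_A = ['Cap4_Leaf_A', 45, 95, 106, 107, 108, 109, 248, 249, 250, 251, 252]
--         Cap4_Leaf_B = ['Cap4_Leaf_B', 44, 98, 102, 103, 104, 105, 243, 244, 245, 246, 247]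
--         Cap4_Leaf_C = ['Cap4_Leaf_C', 43, 96, 97, 99, 100, 101, 238, 239, 240, 241, 242]
--         M_Cluster_4 = ['M_Cluster_4', 7, 10, 18, 28, 128, 132, 135, 144, 147, 159, 166, 179, 184, 186, 192]
--
--         Linker_5 = ['Linker_5', 20, 23, 33, 36, 57, 60, 62, 63, 169, 172, 174, 175, 201, 204, 206, 207]
--         Linker_6 = ['Linker_6', 13, 14, 30, 31, 50, 51, 53, 56, 154, 155, 161, 164, 194, 195, 197, 200]
--         Linker_7 = ['Linker_7', 21, 22, 34, 35, 58, 59, 61, 64, 170, 171, 173, 176, 202, 203, 205, 208]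
--         Linker_8 = ['Linker_8', 12, 15, 29, 32, 49, 52, 54, 55, 153, 156, 162, 163, 193, 196, 198, 199]
--
--         #All lists for easy processing
--         list_of_lists = [Cap1_Stalk, Cap1_Leaf_A, Cap1_Leaf_B, Cap1_Leaf_C, M_Cluster_1, Cap2_Stalk, Cap2_Leaf_A, Cap2_Leaf_B, Cap2_Leaf_C, M_Cluster_2, Cap3_Stalk, Cap3_Leaf_A, Cap3_Leaf_B, Cap3_Leaf_C, M_Cluster_3, Cap4_Stalk, Cap4_Leaf_A, Cap4_Leaf_B, Cap4_Leaf_C, M_Cluster_4, Linker_5, Linker_6, Linker_7, Linker_8]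
--
--         for item in list_of_lists:
--             if index in item: return item[0]
--
--     elif frame >= 122:
--
--         #Frames 122-161
--
--         Cap1_Stalk = ['Cap1_Stalk', 3, 27, 137, 150]
--         Cap1_Leaf_A = ['Cap1_Leaf_A', 46, 112, 116, 117, 118, 119, 258, 259, 260, 261, 262]
--         Cap1_Leaf_B = ['Cap1_Leaf_B', 45, 110, 111, 113, 114, 115, 253, 254, 255, 256, 257]
--         Cap1_Leaf_C = ['Cap1_Leaf_C', 47, 109, 120, 121, 122, 123, 263, 264, 265, 266, 267]
--         M_Cluster_1 = ['M_Cluster_1', 5, 9, 19, 125, 129, 133, 140, 147, 159, 167, 176, 180, 184, 190]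
--
--         Cap2_Stalk = ['Cap2_Stalk', 1, 25, 139, 151]
--         Cap2_Leaf_A = ['Cap2_Leaf_A', 40, 82, 86, 87, 88, 89, 228, 229, 230, 231, 232]
--         Cap2_Leaf_B = ['Cap2_Leaf_B', 39, 80, 81, 83, 84, 85, 223, 224, 225, 226, 227]
--         Cap2_Leaf_C = ['Cap2_Leaf_C', 41, 79, 90, 91, 92, 93, 233, 234, 235, 236, 237]
--         M_Cluster_2 = ['M_Cluster_2', 6, 8, 17, 126, 130, 132, 142, 144, 157, 166, 179, 181, 186, 188]
--
--         Cap3_Stalk = ['Cap3_Stalk', 0, 24, 138, 149]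
--         Cap3_Leaf_A = ['Cap3_Leaf_A', 38, 64, 75, 76, 77, 78, 218, 219, 220, 221, 222]
--         Cap3_Leaf_B = ['Cap3_Leaf_B', 37, 67, 71, 72, 73, 74, 213, 214, 215, 216, 217]
--         Cap3_Leaf_C = ['Cap3_Leaf_C', 36, 65, 66, 68, 69, 70, 208, 209, 210, 211, 212]
--         M_Cluster_3 = ['M_Cluster_3', 4, 11, 16, 124, 128, 135, 141, 145, 156, 164, 177, 182, 187, 189]
--
--         Cap4_Stalk = ['Cap4_Stalk', 2, 26, 136, 148]
--         Cap4_Leaf_A = ['Cap4_Leaf_A', 44, 94, 105, 106, 107, 108, 248, 249, 250, 251, 252]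
--         Cap4_Leaf_B = ['Cap4_Leaf_B', 43, 97, 101, 102, 103, 104, 243, 244, 245, 246, 247]
--         Cap4_Leaf_C = ['Cap4_Leaf_C', 42, 95, 96, 98, 99, 100, 238, 239, 240, 241, 242]
--         M_Cluster_4 = ['M_Cluster_4', 7, 10, 18, 127, 131, 134, 143, 146, 158, 165, 178, 183, 185, 191]
--
--         Linker_5 = ['Linker_5', 20, 23, 32, 35, 56, 59, 61, 62, 168, 171, 173, 174, 200, 203, 205, 206]
--         Linker_6 = ['Linker_6', 13, 14, 29, 30, 49, 50, 52, 55, 153, 154, 160, 163, 193, 194, 196, 199]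
--         Linker_7 = ['Linker_7', 21, 22, 33, 34, 57, 58, 60, 63, 169, 170, 172, 175, 201, 202, 204, 207]
--         Linker_8 = ['Linker_8', 12, 15, 28, 31, 48, 51, 53, 54, 152, 155, 161, 162, 192, 195, 197, 198]
--
--         #All lists for easy processing
--         list_of_lists = [Cap1_Stalk, Cap1_Leaf_A, Cap1_Leaf_B, Cap1_Leaf_C, M_Cluster_1, Cap2_Stalk, Cap2_Leaf_A, Cap2_Leaf_B, Cap2_Leaf_C, M_Cluster_2, Cap3_Stalk, Cap3_Leaf_A, Cap3_Leaf_B, Cap3_Leaf_C, M_Cluster_3, Cap4_Stalk, Cap4_Leaf_A, Cap4_Leaf_B, Cap4_Leaf_C, M_Cluster_4, Linker_5, Linker_6, Linker_7, Linker_8]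
--
--         for item in list_of_lists:
--             if index in item: return item[0]
-- ===== SOURCE B (Python) =====
-- # B: one flat literal dict per frame branch mapping atom index directly to its group name;
-- # the lookup is a single dict.get instead of A's scan over 24 group lists.
-- _EARLY = {
--     3: 'Cap1_Stalk',
--     27: 'Cap1_Stalk',
--     138: 'Cap1_Stalk',
--     151: 'Cap1_Stalk',
--     47: 'Cap1_Leaf_A',
--     113: 'Cap1_Leaf_A',
--     117: 'Cap1_Leaf_A',
--     118: 'Cap1_Leaf_A',
--     119: 'Cap1_Leaf_A',
--     120: 'Cap1_Leaf_A',
--     258: 'Cap1_Leaf_A',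
--     259: 'Cap1_Leaf_A',
--     260: 'Cap1_Leaf_A',
--     261: 'Cap1_Leaf_A',
--     262: 'Cap1_Leaf_A',
--     46: 'Cap1_Leaf_B',
--     111: 'Cap1_Leaf_B',
--     112: 'Cap1_Leaf_B',
--     114: 'Cap1_Leaf_B',
--     115: 'Cap1_Leaf_B',
--     116: 'Cap1_Leaf_B',
--     253: 'Cap1_Leaf_B',
--     254: 'Cap1_Leaf_B',
--     255: 'Cap1_Leaf_B',
--     256: 'Cap1_Leaf_B',
--     257: 'Cap1_Leaf_B',
--     48: 'Cap1_Leaf_C',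
--     110: 'Cap1_Leaf_C',
--     121: 'Cap1_Leaf_C',
--     122: 'Cap1_Leaf_C',
--     123: 'Cap1_Leaf_C',
--     124: 'Cap1_Leaf_C',
--     263: 'Cap1_Leaf_C',
--     264: 'Cap1_Leaf_C',
--     265: 'Cap1_Leaf_C',
--     266: 'Cap1_Leaf_C',
--     267: 'Cap1_Leaf_C',
--     5: 'M_Cluster_1',
--     9: 'M_Cluster_1',
--     19: 'M_Cluster_1',
--     126: 'M_Cluster_1',
--     130: 'M_Cluster_1',
--     134: 'M_Cluster_1',
--     141: 'M_Cluster_1',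
--     148: 'M_Cluster_1',
--     160: 'M_Cluster_1',
--     168: 'M_Cluster_1',
--     177: 'M_Cluster_1',
--     181: 'M_Cluster_1',
--     185: 'M_Cluster_1',
--     191: 'M_Cluster_1',
--     1: 'Cap2_Stalk',
--     25: 'Cap2_Stalk',
--     140: 'Cap2_Stalk',
--     152: 'Cap2_Stalk',
--     41: 'Cap2_Leaf_A',
--     83: 'Cap2_Leaf_A',
--     87: 'Cap2_Leaf_A',
--     88: 'Cap2_Leaf_A',
--     89: 'Cap2_Leaf_A',
--     90: 'Cap2_Leaf_A',
--     229: 'Cap2_Leaf_A',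
--     230: 'Cap2_Leaf_A',
--     231: 'Cap2_Leaf_A',
--     232: 'Cap2_Leaf_A',
--     40: 'Cap2_Leaf_B',
--     81: 'Cap2_Leaf_B',
--     82: 'Cap2_Leaf_B',
--     84: 'Cap2_Leaf_B',
--     85: 'Cap2_Leaf_B',
--     86: 'Cap2_Leaf_B',
--     224: 'Cap2_Leaf_B',
--     225: 'Cap2_Leaf_B',
--     226: 'Cap2_Leaf_B',
--     227: 'Cap2_Leaf_B',
--     228: 'Cap2_Leaf_B',
--     42: 'Cap2_Leaf_C',
--     80: 'Cap2_Leaf_C',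
--     91: 'Cap2_Leaf_C',
--     92: 'Cap2_Leaf_C',
--     93: 'Cap2_Leaf_C',
--     94: 'Cap2_Leaf_C',
--     233: 'Cap2_Leaf_C',
--     234: 'Cap2_Leaf_C',
--     235: 'Cap2_Leaf_C',
--     236: 'Cap2_Leaf_C',
--     237: 'Cap2_Leaf_C',
--     6: 'M_Cluster_2',
--     8: 'M_Cluster_2',
--     17: 'M_Cluster_2',
--     127: 'M_Cluster_2',
--     131: 'M_Cluster_2',
--     133: 'M_Cluster_2',
--     143: 'M_Cluster_2',
--     145: 'M_Cluster_2',
--     158: 'M_Cluster_2',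
--     167: 'M_Cluster_2',
--     180: 'M_Cluster_2',
--     182: 'M_Cluster_2',
--     187: 'M_Cluster_2',
--     189: 'M_Cluster_2',
--     0: 'Cap3_Stalk',
--     24: 'Cap3_Stalk',
--     139: 'Cap3_Stalk',
--     150: 'Cap3_Stalk',
--     39: 'Cap3_Leaf_A',
--     65: 'Cap3_Leaf_A',
--     76: 'Cap3_Leaf_A',
--     77: 'Cap3_Leaf_A',
--     78: 'Cap3_Leaf_A',
--     79: 'Cap3_Leaf_A',
--     219: 'Cap3_Leaf_A',
--     220: 'Cap3_Leaf_A',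
--     221: 'Cap3_Leaf_A',
--     222: 'Cap3_Leaf_A',
--     223: 'Cap3_Leaf_A',
--     38: 'Cap3_Leaf_B',
--     68: 'Cap3_Leaf_B',
--     72: 'Cap3_Leaf_B',
--     73: 'Cap3_Leaf_B',
--     74: 'Cap3_Leaf_B',
--     75: 'Cap3_Leaf_B',
--     214: 'Cap3_Leaf_B',
--     215: 'Cap3_Leaf_B',
--     216: 'Cap3_Leaf_B',
--     217: 'Cap3_Leaf_B',
--     218: 'Cap3_Leaf_B',
--     37: 'Cap3_Leaf_C',
--     66: 'Cap3_Leaf_C',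
--     67: 'Cap3_Leaf_C',
--     69: 'Cap3_Leaf_C',
--     70: 'Cap3_Leaf_C',
--     71: 'Cap3_Leaf_C',
--     209: 'Cap3_Leaf_C',
--     210: 'Cap3_Leaf_C',
--     211: 'Cap3_Leaf_C',
--     212: 'Cap3_Leaf_C',
--     213: 'Cap3_Leaf_C',
--     4: 'M_Cluster_3',
--     11: 'M_Cluster_3',
--     16: 'M_Cluster_3',
--     125: 'M_Cluster_3',
--     129: 'M_Cluster_3',
--     136: 'M_Cluster_3',
--     142: 'M_Cluster_3',
--     146: 'M_Cluster_3',
--     157: 'M_Cluster_3',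
--     165: 'M_Cluster_3',
--     178: 'M_Cluster_3',
--     183: 'M_Cluster_3',
--     188: 'M_Cluster_3',
--     190: 'M_Cluster_3',
--     2: 'Cap4_Stalk',
--     26: 'Cap4_Stalk',
--     137: 'Cap4_Stalk',
--     149: 'Cap4_Stalk',
--     45: 'Cap4_Leaf_A',
--     95: 'Cap4_Leaf_A',
--     106: 'Cap4_Leaf_A',
--     107: 'Cap4_Leaf_A',
--     108: 'Cap4_Leaf_A',
--     109: 'Cap4_Leaf_A',
--     248: 'Cap4_Leaf_A',
--     249: 'Cap4_Leaf_A',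
--     250: 'Cap4_Leaf_A',
--     251: 'Cap4_Leaf_A',
--     252: 'Cap4_Leaf_A',
--     44: 'Cap4_Leaf_B',
--     98: 'Cap4_Leaf_B',
--     102: 'Cap4_Leaf_B',
--     103: 'Cap4_Leaf_B',
--     104: 'Cap4_Leaf_B',
--     105: 'Cap4_Leaf_B',
--     243: 'Cap4_Leaf_B',
--     244: 'Cap4_Leaf_B',
--     245: 'Cap4_Leaf_B',
--     246: 'Cap4_Leaf_B',
--     247: 'Cap4_Leaf_B',
--     43: 'Cap4_Leaf_C',
--     96: 'Cap4_Leaf_C',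
--     97: 'Cap4_Leaf_C',
--     99: 'Cap4_Leaf_C',
--     100: 'Cap4_Leaf_C',
--     101: 'Cap4_Leaf_C',
--     238: 'Cap4_Leaf_C',
--     239: 'Cap4_Leaf_C',
--     240: 'Cap4_Leaf_C',
--     241: 'Cap4_Leaf_C',
--     242: 'Cap4_Leaf_C',
--     7: 'M_Cluster_4',
--     10: 'M_Cluster_4',
--     18: 'M_Cluster_4',
--     28: 'M_Cluster_4',
--     128: 'M_Cluster_4',
--     132: 'M_Cluster_4',
--     135: 'M_Cluster_4',
--     144: 'M_Cluster_4',
--     147: 'M_Cluster_4',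
--     159: 'M_Cluster_4',
--     166: 'M_Cluster_4',
--     179: 'M_Cluster_4',
--     184: 'M_Cluster_4',
--     186: 'M_Cluster_4',
--     192: 'M_Cluster_4',
--     20: 'Linker_5',
--     23: 'Linker_5',
--     33: 'Linker_5',
--     36: 'Linker_5',
--     57: 'Linker_5',
--     60: 'Linker_5',
--     62: 'Linker_5',
--     63: 'Linker_5',
--     169: 'Linker_5',
--     172: 'Linker_5',
--     174: 'Linker_5',
--     175: 'Linker_5',
--     201: 'Linker_5',
--     204: 'Linker_5',
--     206: 'Linker_5',
--     207: 'Linker_5',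
--     13: 'Linker_6',
--     14: 'Linker_6',
--     30: 'Linker_6',
--     31: 'Linker_6',
--     50: 'Linker_6',
--     51: 'Linker_6',
--     53: 'Linker_6',
--     56: 'Linker_6',
--     154: 'Linker_6',
--     155: 'Linker_6',
--     161: 'Linker_6',
--     164: 'Linker_6',
--     194: 'Linker_6',
--     195: 'Linker_6',
--     197: 'Linker_6',
--     200: 'Linker_6',
--     21: 'Linker_7',
--     22: 'Linker_7',
--     34: 'Linker_7',
--     35: 'Linker_7',
--     58: 'Linker_7',
--     59: 'Linker_7',
--     61: 'Linker_7',
--     64: 'Linker_7',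
--     170: 'Linker_7',
--     171: 'Linker_7',
--     173: 'Linker_7',
--     176: 'Linker_7',
--     202: 'Linker_7',
--     203: 'Linker_7',
--     205: 'Linker_7',
--     208: 'Linker_7',
--     12: 'Linker_8',
--     15: 'Linker_8',
--     29: 'Linker_8',
--     32: 'Linker_8',
--     49: 'Linker_8',
--     52: 'Linker_8',
--     54: 'Linker_8',
--     55: 'Linker_8',
--     153: 'Linker_8',
--     156: 'Linker_8',
--     162: 'Linker_8',
--     163: 'Linker_8',
--     193: 'Linker_8',
--     196: 'Linker_8',
--     198: 'Linker_8',
--     199: 'Linker_8',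
-- }
--
-- _LATE = {
--     3: 'Cap1_Stalk',
--     27: 'Cap1_Stalk',
--     137: 'Cap1_Stalk',
--     150: 'Cap1_Stalk',
--     46: 'Cap1_Leaf_A',
--     112: 'Cap1_Leaf_A',
--     116: 'Cap1_Leaf_A',
--     117: 'Cap1_Leaf_A',
--     118: 'Cap1_Leaf_A',
--     119: 'Cap1_Leaf_A',
--     258: 'Cap1_Leaf_A',
--     259: 'Cap1_Leaf_A',
--     260: 'Cap1_Leaf_A',
--     261: 'Cap1_Leaf_A',
--     262: 'Cap1_Leaf_A',
--     45: 'Cap1_Leaf_B',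
--     110: 'Cap1_Leaf_B',
--     111: 'Cap1_Leaf_B',
--     113: 'Cap1_Leaf_B',
--     114: 'Cap1_Leaf_B',
--     115: 'Cap1_Leaf_B',
--     253: 'Cap1_Leaf_B',
--     254: 'Cap1_Leaf_B',
--     255: 'Cap1_Leaf_B',
--     256: 'Cap1_Leaf_B',
--     257: 'Cap1_Leaf_B',
--     47: 'Cap1_Leaf_C',
--     109: 'Cap1_Leaf_C',
--     120: 'Cap1_Leaf_C',
--     121: 'Cap1_Leaf_C',
--     122: 'Cap1_Leaf_C',
--     123: 'Cap1_Leaf_C',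
--     263: 'Cap1_Leaf_C',
--     264: 'Cap1_Leaf_C',
--     265: 'Cap1_Leaf_C',
--     266: 'Cap1_Leaf_C',
--     267: 'Cap1_Leaf_C',
--     5: 'M_Cluster_1',
--     9: 'M_Cluster_1',
--     19: 'M_Cluster_1',
--     125: 'M_Cluster_1',
--     129: 'M_Cluster_1',
--     133: 'M_Cluster_1',
--     140: 'M_Cluster_1',
--     147: 'M_Cluster_1',
--     159: 'M_Cluster_1',
--     167: 'M_Cluster_1',
--     176: 'M_Cluster_1',
--     180: 'M_Cluster_1',
--     184: 'M_Cluster_1',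
--     190: 'M_Cluster_1',
--     1: 'Cap2_Stalk',
--     25: 'Cap2_Stalk',
--     139: 'Cap2_Stalk',
--     151: 'Cap2_Stalk',
--     40: 'Cap2_Leaf_A',
--     82: 'Cap2_Leaf_A',
--     86: 'Cap2_Leaf_A',
--     87: 'Cap2_Leaf_A',
--     88: 'Cap2_Leaf_A',
--     89: 'Cap2_Leaf_A',
--     228: 'Cap2_Leaf_A',
--     229: 'Cap2_Leaf_A',
--     230: 'Cap2_Leaf_A',
--     231: 'Cap2_Leaf_A',
--     232: 'Cap2_Leaf_A',
--     39: 'Cap2_Leaf_B',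
--     80: 'Cap2_Leaf_B',
--     81: 'Cap2_Leaf_B',
--     83: 'Cap2_Leaf_B',
--     84: 'Cap2_Leaf_B',
--     85: 'Cap2_Leaf_B',
--     223: 'Cap2_Leaf_B',
--     224: 'Cap2_Leaf_B',
--     225: 'Cap2_Leaf_B',
--     226: 'Cap2_Leaf_B',
--     227: 'Cap2_Leaf_B',
--     41: 'Cap2_Leaf_C',
--     79: 'Cap2_Leaf_C',
--     90: 'Cap2_Leaf_C',
--     91: 'Cap2_Leaf_C',
--     92: 'Cap2_Leaf_C',
--     93: 'Cap2_Leaf_C',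
--     233: 'Cap2_Leaf_C',
--     234: 'Cap2_Leaf_C',
--     235: 'Cap2_Leaf_C',
--     236: 'Cap2_Leaf_C',
--     237: 'Cap2_Leaf_C',
--     6: 'M_Cluster_2',
--     8: 'M_Cluster_2',
--     17: 'M_Cluster_2',
--     126: 'M_Cluster_2',
--     130: 'M_Cluster_2',
--     132: 'M_Cluster_2',
--     142: 'M_Cluster_2',
--     144: 'M_Cluster_2',
--     157: 'M_Cluster_2',
--     166: 'M_Cluster_2',
--     179: 'M_Cluster_2',
--     181: 'M_Cluster_2',
--     186: 'M_Cluster_2',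
--     188: 'M_Cluster_2',
--     0: 'Cap3_Stalk',
--     24: 'Cap3_Stalk',
--     138: 'Cap3_Stalk',
--     149: 'Cap3_Stalk',
--     38: 'Cap3_Leaf_A',
--     64: 'Cap3_Leaf_A',
--     75: 'Cap3_Leaf_A',
--     76: 'Cap3_Leaf_A',
--     77: 'Cap3_Leaf_A',
--     78: 'Cap3_Leaf_A',
--     218: 'Cap3_Leaf_A',
--     219: 'Cap3_Leaf_A',
--     220: 'Cap3_Leaf_A',
--     221: 'Cap3_Leaf_A',
--     222: 'Cap3_Leaf_A',
--     37: 'Cap3_Leaf_B',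
--     67: 'Cap3_Leaf_B',
--     71: 'Cap3_Leaf_B',
--     72: 'Cap3_Leaf_B',
--     73: 'Cap3_Leaf_B',
--     74: 'Cap3_Leaf_B',
--     213: 'Cap3_Leaf_B',
--     214: 'Cap3_Leaf_B',
--     215: 'Cap3_Leaf_B',
--     216: 'Cap3_Leaf_B',
--     217: 'Cap3_Leaf_B',
--     36: 'Cap3_Leaf_C',
--     65: 'Cap3_Leaf_C',
--     66: 'Cap3_Leaf_C',
--     68: 'Cap3_Leaf_C',
--     69: 'Cap3_Leaf_C',
--     70: 'Cap3_Leaf_C',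
--     208: 'Cap3_Leaf_C',
--     209: 'Cap3_Leaf_C',
--     210: 'Cap3_Leaf_C',
--     211: 'Cap3_Leaf_C',
--     212: 'Cap3_Leaf_C',
--     4: 'M_Cluster_3',
--     11: 'M_Cluster_3',
--     16: 'M_Cluster_3',
--     124: 'M_Cluster_3',
--     128: 'M_Cluster_3',
--     135: 'M_Cluster_3',
--     141: 'M_Cluster_3',
--     145: 'M_Cluster_3',
--     156: 'M_Cluster_3',
--     164: 'M_Cluster_3',
--     177: 'M_Cluster_3',
--     182: 'M_Cluster_3',
--     187: 'M_Cluster_3',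
--     189: 'M_Cluster_3',
--     2: 'Cap4_Stalk',
--     26: 'Cap4_Stalk',
--     136: 'Cap4_Stalk',
--     148: 'Cap4_Stalk',
--     44: 'Cap4_Leaf_A',
--     94: 'Cap4_Leaf_A',
--     105: 'Cap4_Leaf_A',
--     106: 'Cap4_Leaf_A',
--     107: 'Cap4_Leaf_A',
--     108: 'Cap4_Leaf_A',
--     248: 'Cap4_Leaf_A',
--     249: 'Cap4_Leaf_A',
--     250: 'Cap4_Leaf_A',
--     251: 'Cap4_Leaf_A',
--     252: 'Cap4_Leaf_A',
--     43: 'Cap4_Leaf_B',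
--     97: 'Cap4_Leaf_B',
--     101: 'Cap4_Leaf_B',
--     102: 'Cap4_Leaf_B',
--     103: 'Cap4_Leaf_B',
--     104: 'Cap4_Leaf_B',
--     243: 'Cap4_Leaf_B',
--     244: 'Cap4_Leaf_B',
--     245: 'Cap4_Leaf_B',
--     246: 'Cap4_Leaf_B',
--     247: 'Cap4_Leaf_B',
--     42: 'Cap4_Leaf_C',
--     95: 'Cap4_Leaf_C',
--     96: 'Cap4_Leaf_C',
--     98: 'Cap4_Leaf_C',
--     99: 'Cap4_Leaf_C',
--     100: 'Cap4_Leaf_C',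
--     238: 'Cap4_Leaf_C',
--     239: 'Cap4_Leaf_C',
--     240: 'Cap4_Leaf_C',
--     241: 'Cap4_Leaf_C',
--     242: 'Cap4_Leaf_C',
--     7: 'M_Cluster_4',
--     10: 'M_Cluster_4',
--     18: 'M_Cluster_4',
--     127: 'M_Cluster_4',
--     131: 'M_Cluster_4',
--     134: 'M_Cluster_4',
--     143: 'M_Cluster_4',
--     146: 'M_Cluster_4',
--     158: 'M_Cluster_4',
--     165: 'M_Cluster_4',
--     178: 'M_Cluster_4',
--     183: 'M_Cluster_4',
--     185: 'M_Cluster_4',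
--     191: 'M_Cluster_4',
--     20: 'Linker_5',
--     23: 'Linker_5',
--     32: 'Linker_5',
--     35: 'Linker_5',
--     56: 'Linker_5',
--     59: 'Linker_5',
--     61: 'Linker_5',
--     62: 'Linker_5',
--     168: 'Linker_5',
--     171: 'Linker_5',
--     173: 'Linker_5',
--     174: 'Linker_5',
--     200: 'Linker_5',
--     203: 'Linker_5',
--     205: 'Linker_5',
--     206: 'Linker_5',
--     13: 'Linker_6',
--     14: 'Linker_6',
--     29: 'Linker_6',
--     30: 'Linker_6',
--     49: 'Linker_6',
--     50: 'Linker_6',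
--     52: 'Linker_6',
--     55: 'Linker_6',
--     153: 'Linker_6',
--     154: 'Linker_6',
--     160: 'Linker_6',
--     163: 'Linker_6',
--     193: 'Linker_6',
--     194: 'Linker_6',
--     196: 'Linker_6',
--     199: 'Linker_6',
--     21: 'Linker_7',
--     22: 'Linker_7',
--     33: 'Linker_7',
--     34: 'Linker_7',
--     57: 'Linker_7',
--     58: 'Linker_7',
--     60: 'Linker_7',
--     63: 'Linker_7',
--     169: 'Linker_7',
--     170: 'Linker_7',
--     172: 'Linker_7',
--     175: 'Linker_7',
--     201: 'Linker_7',
--     202: 'Linker_7',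
--     204: 'Linker_7',
--     207: 'Linker_7',
--     12: 'Linker_8',
--     15: 'Linker_8',
--     28: 'Linker_8',
--     31: 'Linker_8',
--     48: 'Linker_8',
--     51: 'Linker_8',
--     53: 'Linker_8',
--     54: 'Linker_8',
--     152: 'Linker_8',
--     155: 'Linker_8',
--     161: 'Linker_8',
--     162: 'Linker_8',
--     192: 'Linker_8',
--     195: 'Linker_8',
--     197: 'Linker_8',
--     198: 'Linker_8',
-- }
--
-- def identifyMOF5Index(frame, index):
--     return (_EARLY if frame <= 121 else _LATE).get(index)
-- ===== Notes on version B (the rewrite author's own statement) =====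
-- stated objective: idiomatic
-- what changed: A scans 24 group lists with 'index in item' until one matches; B keeps one flat literal dict per frame branch mapping each atom index directly to its group name and answers with a single dict.get lookup.
import Mathlib
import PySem

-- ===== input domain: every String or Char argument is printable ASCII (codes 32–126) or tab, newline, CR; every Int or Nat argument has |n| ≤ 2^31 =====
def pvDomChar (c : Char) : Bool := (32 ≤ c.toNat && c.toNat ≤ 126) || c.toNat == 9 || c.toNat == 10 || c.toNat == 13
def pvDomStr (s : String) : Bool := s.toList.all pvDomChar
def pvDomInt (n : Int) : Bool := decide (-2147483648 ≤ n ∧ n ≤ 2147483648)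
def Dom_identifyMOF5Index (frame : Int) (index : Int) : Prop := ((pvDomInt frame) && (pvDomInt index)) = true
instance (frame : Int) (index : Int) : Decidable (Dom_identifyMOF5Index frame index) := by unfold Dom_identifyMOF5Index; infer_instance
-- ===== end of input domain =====

-- B replaces A's scan over 24 per-group lists by one flat literal dict (atom index -> group name)
-- per frame branch, answered with a single lookup (objective: idiomatic).

-- ===== PORT A =====
-- A's literal per-group tables, in A's order
def pvGroupsEarly : List (String × List Int) := [
  ("Cap1_Stalk", [3, 27, 138, 151]),
  ("Cap1_Leaf_A", [47, 113, 117, 118, 119, 120, 258, 259, 260, 261, 262]),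
  ("Cap1_Leaf_B", [46, 111, 112, 114, 115, 116, 253, 254, 255, 256, 257]),
  ("Cap1_Leaf_C", [48, 110, 121, 122, 123, 124, 263, 264, 265, 266, 267]),
  ("M_Cluster_1", [5, 9, 19, 126, 130, 134, 141, 148, 160, 168, 177, 181, 185, 191]),
  ("Cap2_Stalk", [1, 25, 140, 152]),
  ("Cap2_Leaf_A", [41, 83, 87, 88, 89, 90, 229, 230, 231, 232]),
  ("Cap2_Leaf_B", [40, 81, 82, 84, 85, 86, 224, 225, 226, 227, 228]),
  ("Cap2_Leaf_C", [42, 80, 91, 92, 93, 94, 233, 234, 235, 236, 237]),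
  ("M_Cluster_2", [6, 8, 17, 127, 131, 133, 143, 145, 158, 167, 180, 182, 187, 189]),
  ("Cap3_Stalk", [0, 24, 139, 150]),
  ("Cap3_Leaf_A", [39, 65, 76, 77, 78, 79, 219, 220, 221, 222, 223]),
  ("Cap3_Leaf_B", [38, 68, 72, 73, 74, 75, 214, 215, 216, 217, 218]),
  ("Cap3_Leaf_C", [37, 66, 67, 69, 70, 71, 209, 210, 211, 212, 213]),
  ("M_Cluster_3", [4, 11, 16, 125, 129, 136, 142, 146, 157, 165, 178, 183, 188, 190]),
  ("Cap4_Stalk", [2, 26, 137, 149]),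
  ("Cap4_Leaf_A", [45, 95, 106, 107, 108, 109, 248, 249, 250, 251, 252]),
  ("Cap4_Leaf_B", [44, 98, 102, 103, 104, 105, 243, 244, 245, 246, 247]),
  ("Cap4_Leaf_C", [43, 96, 97, 99, 100, 101, 238, 239, 240, 241, 242]),
  ("M_Cluster_4", [7, 10, 18, 28, 128, 132, 135, 144, 147, 159, 166, 179, 184, 186, 192]),
  ("Linker_5", [20, 23, 33, 36, 57, 60, 62, 63, 169, 172, 174, 175, 201, 204, 206, 207]),
  ("Linker_6", [13, 14, 30, 31, 50, 51, 53, 56, 154, 155, 161, 164, 194, 195, 197, 200]),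
  ("Linker_7", [21, 22, 34, 35, 58, 59, 61, 64, 170, 171, 173, 176, 202, 203, 205, 208]),
  ("Linker_8", [12, 15, 29, 32, 49, 52, 54, 55, 153, 156, 162, 163, 193, 196, 198, 199])
]

def pvGroupsLate : List (String × List Int) := [
  ("Cap1_Stalk", [3, 27, 137, 150]),
  ("Cap1_Leaf_A", [46, 112, 116, 117, 118, 119, 258, 259, 260, 261, 262]),
  ("Cap1_Leaf_B", [45, 110, 111, 113, 114, 115, 253, 254, 255, 256, 257]),
  ("Cap1_Leaf_C", [47, 109, 120, 121, 122, 123, 263, 264, 265, 266, 267]),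
  ("M_Cluster_1", [5, 9, 19, 125, 129, 133, 140, 147, 159, 167, 176, 180, 184, 190]),
  ("Cap2_Stalk", [1, 25, 139, 151]),
  ("Cap2_Leaf_A", [40, 82, 86, 87, 88, 89, 228, 229, 230, 231, 232]),
  ("Cap2_Leaf_B", [39, 80, 81, 83, 84, 85, 223, 224, 225, 226, 227]),
  ("Cap2_Leaf_C", [41, 79, 90, 91, 92, 93, 233, 234, 235, 236, 237]),
  ("M_Cluster_2", [6, 8, 17, 126, 130, 132, 142, 144, 157, 166, 179, 181, 186, 188]),
  ("Cap3_Stalk", [0, 24, 138, 149]),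
  ("Cap3_Leaf_A", [38, 64, 75, 76, 77, 78, 218, 219, 220, 221, 222]),
  ("Cap3_Leaf_B", [37, 67, 71, 72, 73, 74, 213, 214, 215, 216, 217]),
  ("Cap3_Leaf_C", [36, 65, 66, 68, 69, 70, 208, 209, 210, 211, 212]),
  ("M_Cluster_3", [4, 11, 16, 124, 128, 135, 141, 145, 156, 164, 177, 182, 187, 189]),
  ("Cap4_Stalk", [2, 26, 136, 148]),
  ("Cap4_Leaf_A", [44, 94, 105, 106, 107, 108, 248, 249, 250, 251, 252]),
  ("Cap4_Leaf_B", [43, 97, 101, 102, 103, 104, 243, 244, 245, 246, 247]),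
  ("Cap4_Leaf_C", [42, 95, 96, 98, 99, 100, 238, 239, 240, 241, 242]),
  ("M_Cluster_4", [7, 10, 18, 127, 131, 134, 143, 146, 158, 165, 178, 183, 185, 191]),
  ("Linker_5", [20, 23, 32, 35, 56, 59, 61, 62, 168, 171, 173, 174, 200, 203, 205, 206]),
  ("Linker_6", [13, 14, 29, 30, 49, 50, 52, 55, 153, 154, 160, 163, 193, 194, 196, 199]),
  ("Linker_7", [21, 22, 33, 34, 57, 58, 60, 63, 169, 170, 172, 175, 201, 202, 204, 207]),
  ("Linker_8", [12, 15, 28, 31, 48, 51, 53, 54, 152, 155, 161, 162, 192, 195, 197, 198])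
]

-- A's branch loop: 'for item in list_of_lists: if index in item: return item[0]'.
-- Each Python item is ['Name', i1, i2, …]; an int never equals the leading name string in Python,
-- so 'index in item' is exactly 'ids.contains index'.
def pvFirstMatch (index : Int) : List (String × List Int) → Option String
  | [] => none
  | (name, ids) :: rest => if ids.contains index then some name else pvFirstMatch index rest

def identifyMOF5Index (frame : Int) (index : Int) : Option String :=
  if frame ≤ 121 then pvFirstMatch index pvGroupsEarly
  else if frame ≥ 122 then pvFirstMatch index pvGroupsLate
  else none  -- unreachable on Int, mirrors Python's if/elif falling through

-- ===== PORT B =====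
-- Source B's flat literal dicts _EARLY and _LATE (index -> group name), in the same literal order
def pvFlatEarly : List (Int × String) := [
  (3, "Cap1_Stalk"), (27, "Cap1_Stalk"), (138, "Cap1_Stalk"), (151, "Cap1_Stalk"),
  (47, "Cap1_Leaf_A"), (113, "Cap1_Leaf_A"), (117, "Cap1_Leaf_A"), (118, "Cap1_Leaf_A"),
  (119, "Cap1_Leaf_A"), (120, "Cap1_Leaf_A"), (258, "Cap1_Leaf_A"), (259, "Cap1_Leaf_A"),
  (260, "Cap1_Leaf_A"), (261, "Cap1_Leaf_A"), (262, "Cap1_Leaf_A"), (46, "Cap1_Leaf_B"),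
  (111, "Cap1_Leaf_B"), (112, "Cap1_Leaf_B"), (114, "Cap1_Leaf_B"), (115, "Cap1_Leaf_B"),
  (116, "Cap1_Leaf_B"), (253, "Cap1_Leaf_B"), (254, "Cap1_Leaf_B"), (255, "Cap1_Leaf_B"),
  (256, "Cap1_Leaf_B"), (257, "Cap1_Leaf_B"), (48, "Cap1_Leaf_C"), (110, "Cap1_Leaf_C"),
  (121, "Cap1_Leaf_C"), (122, "Cap1_Leaf_C"), (123, "Cap1_Leaf_C"), (124, "Cap1_Leaf_C"),
  (263, "Cap1_Leaf_C"), (264, "Cap1_Leaf_C"), (265, "Cap1_Leaf_C"), (266, "Cap1_Leaf_C"),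
  (267, "Cap1_Leaf_C"), (5, "M_Cluster_1"), (9, "M_Cluster_1"), (19, "M_Cluster_1"),
  (126, "M_Cluster_1"), (130, "M_Cluster_1"), (134, "M_Cluster_1"), (141, "M_Cluster_1"),
  (148, "M_Cluster_1"), (160, "M_Cluster_1"), (168, "M_Cluster_1"), (177, "M_Cluster_1"),
  (181, "M_Cluster_1"), (185, "M_Cluster_1"), (191, "M_Cluster_1"), (1, "Cap2_Stalk"),
  (25, "Cap2_Stalk"), (140, "Cap2_Stalk"), (152, "Cap2_Stalk"), (41, "Cap2_Leaf_A"),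
  (83, "Cap2_Leaf_A"), (87, "Cap2_Leaf_A"), (88, "Cap2_Leaf_A"), (89, "Cap2_Leaf_A"),
  (90, "Cap2_Leaf_A"), (229, "Cap2_Leaf_A"), (230, "Cap2_Leaf_A"), (231, "Cap2_Leaf_A"),
  (232, "Cap2_Leaf_A"), (40, "Cap2_Leaf_B"), (81, "Cap2_Leaf_B"), (82, "Cap2_Leaf_B"),
  (84, "Cap2_Leaf_B"), (85, "Cap2_Leaf_B"), (86, "Cap2_Leaf_B"), (224, "Cap2_Leaf_B"),
  (225, "Cap2_Leaf_B"), (226, "Cap2_Leaf_B"), (227, "Cap2_Leaf_B"), (228, "Cap2_Leaf_B"),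
  (42, "Cap2_Leaf_C"), (80, "Cap2_Leaf_C"), (91, "Cap2_Leaf_C"), (92, "Cap2_Leaf_C"),
  (93, "Cap2_Leaf_C"), (94, "Cap2_Leaf_C"), (233, "Cap2_Leaf_C"), (234, "Cap2_Leaf_C"),
  (235, "Cap2_Leaf_C"), (236, "Cap2_Leaf_C"), (237, "Cap2_Leaf_C"), (6, "M_Cluster_2"),
  (8, "M_Cluster_2"), (17, "M_Cluster_2"), (127, "M_Cluster_2"), (131, "M_Cluster_2"),
  (133, "M_Cluster_2"), (143, "M_Cluster_2"), (145, "M_Cluster_2"), (158, "M_Cluster_2"),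
  (167, "M_Cluster_2"), (180, "M_Cluster_2"), (182, "M_Cluster_2"), (187, "M_Cluster_2"),
  (189, "M_Cluster_2"), (0, "Cap3_Stalk"), (24, "Cap3_Stalk"), (139, "Cap3_Stalk"),
  (150, "Cap3_Stalk"), (39, "Cap3_Leaf_A"), (65, "Cap3_Leaf_A"), (76, "Cap3_Leaf_A"),
  (77, "Cap3_Leaf_A"), (78, "Cap3_Leaf_A"), (79, "Cap3_Leaf_A"), (219, "Cap3_Leaf_A"),
  (220, "Cap3_Leaf_A"), (221, "Cap3_Leaf_A"), (222, "Cap3_Leaf_A"), (223, "Cap3_Leaf_A"),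
  (38, "Cap3_Leaf_B"), (68, "Cap3_Leaf_B"), (72, "Cap3_Leaf_B"), (73, "Cap3_Leaf_B"),
  (74, "Cap3_Leaf_B"), (75, "Cap3_Leaf_B"), (214, "Cap3_Leaf_B"), (215, "Cap3_Leaf_B"),
  (216, "Cap3_Leaf_B"), (217, "Cap3_Leaf_B"), (218, "Cap3_Leaf_B"), (37, "Cap3_Leaf_C"),
  (66, "Cap3_Leaf_C"), (67, "Cap3_Leaf_C"), (69, "Cap3_Leaf_C"), (70, "Cap3_Leaf_C"),
  (71, "Cap3_Leaf_C"), (209, "Cap3_Leaf_C"), (210, "Cap3_Leaf_C"), (211, "Cap3_Leaf_C"),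
  (212, "Cap3_Leaf_C"), (213, "Cap3_Leaf_C"), (4, "M_Cluster_3"), (11, "M_Cluster_3"),
  (16, "M_Cluster_3"), (125, "M_Cluster_3"), (129, "M_Cluster_3"), (136, "M_Cluster_3"),
  (142, "M_Cluster_3"), (146, "M_Cluster_3"), (157, "M_Cluster_3"), (165, "M_Cluster_3"),
  (178, "M_Cluster_3"), (183, "M_Cluster_3"), (188, "M_Cluster_3"), (190, "M_Cluster_3"),
  (2, "Cap4_Stalk"), (26, "Cap4_Stalk"), (137, "Cap4_Stalk"), (149, "Cap4_Stalk"),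
  (45, "Cap4_Leaf_A"), (95, "Cap4_Leaf_A"), (106, "Cap4_Leaf_A"), (107, "Cap4_Leaf_A"),
  (108, "Cap4_Leaf_A"), (109, "Cap4_Leaf_A"), (248, "Cap4_Leaf_A"), (249, "Cap4_Leaf_A"),
  (250, "Cap4_Leaf_A"), (251, "Cap4_Leaf_A"), (252, "Cap4_Leaf_A"), (44, "Cap4_Leaf_B"),
  (98, "Cap4_Leaf_B"), (102, "Cap4_Leaf_B"), (103, "Cap4_Leaf_B"), (104, "Cap4_Leaf_B"),
  (105, "Cap4_Leaf_B"), (243, "Cap4_Leaf_B"), (244, "Cap4_Leaf_B"), (245, "Cap4_Leaf_B"),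
  (246, "Cap4_Leaf_B"), (247, "Cap4_Leaf_B"), (43, "Cap4_Leaf_C"), (96, "Cap4_Leaf_C"),
  (97, "Cap4_Leaf_C"), (99, "Cap4_Leaf_C"), (100, "Cap4_Leaf_C"), (101, "Cap4_Leaf_C"),
  (238, "Cap4_Leaf_C"), (239, "Cap4_Leaf_C"), (240, "Cap4_Leaf_C"), (241, "Cap4_Leaf_C"),
  (242, "Cap4_Leaf_C"), (7, "M_Cluster_4"), (10, "M_Cluster_4"), (18, "M_Cluster_4"),
  (28, "M_Cluster_4"), (128, "M_Cluster_4"), (132, "M_Cluster_4"), (135, "M_Cluster_4"),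
  (144, "M_Cluster_4"), (147, "M_Cluster_4"), (159, "M_Cluster_4"), (166, "M_Cluster_4"),
  (179, "M_Cluster_4"), (184, "M_Cluster_4"), (186, "M_Cluster_4"), (192, "M_Cluster_4"),
  (20, "Linker_5"), (23, "Linker_5"), (33, "Linker_5"), (36, "Linker_5"),
  (57, "Linker_5"), (60, "Linker_5"), (62, "Linker_5"), (63, "Linker_5"),
  (169, "Linker_5"), (172, "Linker_5"), (174, "Linker_5"), (175, "Linker_5"),
  (201, "Linker_5"), (204, "Linker_5"), (206, "Linker_5"), (207, "Linker_5"),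
  (13, "Linker_6"), (14, "Linker_6"), (30, "Linker_6"), (31, "Linker_6"),
  (50, "Linker_6"), (51, "Linker_6"), (53, "Linker_6"), (56, "Linker_6"),
  (154, "Linker_6"), (155, "Linker_6"), (161, "Linker_6"), (164, "Linker_6"),
  (194, "Linker_6"), (195, "Linker_6"), (197, "Linker_6"), (200, "Linker_6"),
  (21, "Linker_7"), (22, "Linker_7"), (34, "Linker_7"), (35, "Linker_7"),
  (58, "Linker_7"), (59, "Linker_7"), (61, "Linker_7"), (64, "Linker_7"),
  (170, "Linker_7"), (171, "Linker_7"), (173, "Linker_7"), (176, "Linker_7"),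
  (202, "Linker_7"), (203, "Linker_7"), (205, "Linker_7"), (208, "Linker_7"),
  (12, "Linker_8"), (15, "Linker_8"), (29, "Linker_8"), (32, "Linker_8"),
  (49, "Linker_8"), (52, "Linker_8"), (54, "Linker_8"), (55, "Linker_8"),
  (153, "Linker_8"), (156, "Linker_8"), (162, "Linker_8"), (163, "Linker_8"),
  (193, "Linker_8"), (196, "Linker_8"), (198, "Linker_8"), (199, "Linker_8")
]

def pvFlatLate : List (Int × String) := [
  (3, "Cap1_Stalk"), (27, "Cap1_Stalk"), (137, "Cap1_Stalk"), (150, "Cap1_Stalk"),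
  (46, "Cap1_Leaf_A"), (112, "Cap1_Leaf_A"), (116, "Cap1_Leaf_A"), (117, "Cap1_Leaf_A"),
  (118, "Cap1_Leaf_A"), (119, "Cap1_Leaf_A"), (258, "Cap1_Leaf_A"), (259, "Cap1_Leaf_A"),
  (260, "Cap1_Leaf_A"), (261, "Cap1_Leaf_A"), (262, "Cap1_Leaf_A"), (45, "Cap1_Leaf_B"),
  (110, "Cap1_Leaf_B"), (111, "Cap1_Leaf_B"), (113, "Cap1_Leaf_B"), (114, "Cap1_Leaf_B"),
  (115, "Cap1_Leaf_B"), (253, "Cap1_Leaf_B"), (254, "Cap1_Leaf_B"), (255, "Cap1_Leaf_B"),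
  (256, "Cap1_Leaf_B"), (257, "Cap1_Leaf_B"), (47, "Cap1_Leaf_C"), (109, "Cap1_Leaf_C"),
  (120, "Cap1_Leaf_C"), (121, "Cap1_Leaf_C"), (122, "Cap1_Leaf_C"), (123, "Cap1_Leaf_C"),
  (263, "Cap1_Leaf_C"), (264, "Cap1_Leaf_C"), (265, "Cap1_Leaf_C"), (266, "Cap1_Leaf_C"),
  (267, "Cap1_Leaf_C"), (5, "M_Cluster_1"), (9, "M_Cluster_1"), (19, "M_Cluster_1"),
  (125, "M_Cluster_1"), (129, "M_Cluster_1"), (133, "M_Cluster_1"), (140, "M_Cluster_1"),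
  (147, "M_Cluster_1"), (159, "M_Cluster_1"), (167, "M_Cluster_1"), (176, "M_Cluster_1"),
  (180, "M_Cluster_1"), (184, "M_Cluster_1"), (190, "M_Cluster_1"), (1, "Cap2_Stalk"),
  (25, "Cap2_Stalk"), (139, "Cap2_Stalk"), (151, "Cap2_Stalk"), (40, "Cap2_Leaf_A"),
  (82, "Cap2_Leaf_A"), (86, "Cap2_Leaf_A"), (87, "Cap2_Leaf_A"), (88, "Cap2_Leaf_A"),
  (89, "Cap2_Leaf_A"), (228, "Cap2_Leaf_A"), (229, "Cap2_Leaf_A"), (230, "Cap2_Leaf_A"),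
  (231, "Cap2_Leaf_A"), (232, "Cap2_Leaf_A"), (39, "Cap2_Leaf_B"), (80, "Cap2_Leaf_B"),
  (81, "Cap2_Leaf_B"), (83, "Cap2_Leaf_B"), (84, "Cap2_Leaf_B"), (85, "Cap2_Leaf_B"),
  (223, "Cap2_Leaf_B"), (224, "Cap2_Leaf_B"), (225, "Cap2_Leaf_B"), (226, "Cap2_Leaf_B"),
  (227, "Cap2_Leaf_B"), (41, "Cap2_Leaf_C"), (79, "Cap2_Leaf_C"), (90, "Cap2_Leaf_C"),
  (91, "Cap2_Leaf_C"), (92, "Cap2_Leaf_C"), (93, "Cap2_Leaf_C"), (233, "Cap2_Leaf_C"),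
  (234, "Cap2_Leaf_C"), (235, "Cap2_Leaf_C"), (236, "Cap2_Leaf_C"), (237, "Cap2_Leaf_C"),
  (6, "M_Cluster_2"), (8, "M_Cluster_2"), (17, "M_Cluster_2"), (126, "M_Cluster_2"),
  (130, "M_Cluster_2"), (132, "M_Cluster_2"), (142, "M_Cluster_2"), (144, "M_Cluster_2"),
  (157, "M_Cluster_2"), (166, "M_Cluster_2"), (179, "M_Cluster_2"), (181, "M_Cluster_2"),
  (186, "M_Cluster_2"), (188, "M_Cluster_2"), (0, "Cap3_Stalk"), (24, "Cap3_Stalk"),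
  (138, "Cap3_Stalk"), (149, "Cap3_Stalk"), (38, "Cap3_Leaf_A"), (64, "Cap3_Leaf_A"),
  (75, "Cap3_Leaf_A"), (76, "Cap3_Leaf_A"), (77, "Cap3_Leaf_A"), (78, "Cap3_Leaf_A"),
  (218, "Cap3_Leaf_A"), (219, "Cap3_Leaf_A"), (220, "Cap3_Leaf_A"), (221, "Cap3_Leaf_A"),
  (222, "Cap3_Leaf_A"), (37, "Cap3_Leaf_B"), (67, "Cap3_Leaf_B"), (71, "Cap3_Leaf_B"),
  (72, "Cap3_Leaf_B"), (73, "Cap3_Leaf_B"), (74, "Cap3_Leaf_B"), (213, "Cap3_Leaf_B"),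
  (214, "Cap3_Leaf_B"), (215, "Cap3_Leaf_B"), (216, "Cap3_Leaf_B"), (217, "Cap3_Leaf_B"),
  (36, "Cap3_Leaf_C"), (65, "Cap3_Leaf_C"), (66, "Cap3_Leaf_C"), (68, "Cap3_Leaf_C"),
  (69, "Cap3_Leaf_C"), (70, "Cap3_Leaf_C"), (208, "Cap3_Leaf_C"), (209, "Cap3_Leaf_C"),
  (210, "Cap3_Leaf_C"), (211, "Cap3_Leaf_C"), (212, "Cap3_Leaf_C"), (4, "M_Cluster_3"),
  (11, "M_Cluster_3"), (16, "M_Cluster_3"), (124, "M_Cluster_3"), (128, "M_Cluster_3"),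
  (135, "M_Cluster_3"), (141, "M_Cluster_3"), (145, "M_Cluster_3"), (156, "M_Cluster_3"),
  (164, "M_Cluster_3"), (177, "M_Cluster_3"), (182, "M_Cluster_3"), (187, "M_Cluster_3"),
  (189, "M_Cluster_3"), (2, "Cap4_Stalk"), (26, "Cap4_Stalk"), (136, "Cap4_Stalk"),
  (148, "Cap4_Stalk"), (44, "Cap4_Leaf_A"), (94, "Cap4_Leaf_A"), (105, "Cap4_Leaf_A"),
  (106, "Cap4_Leaf_A"), (107, "Cap4_Leaf_A"), (108, "Cap4_Leaf_A"), (248, "Cap4_Leaf_A"),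
  (249, "Cap4_Leaf_A"), (250, "Cap4_Leaf_A"), (251, "Cap4_Leaf_A"), (252, "Cap4_Leaf_A"),
  (43, "Cap4_Leaf_B"), (97, "Cap4_Leaf_B"), (101, "Cap4_Leaf_B"), (102, "Cap4_Leaf_B"),
  (103, "Cap4_Leaf_B"), (104, "Cap4_Leaf_B"), (243, "Cap4_Leaf_B"), (244, "Cap4_Leaf_B"),
  (245, "Cap4_Leaf_B"), (246, "Cap4_Leaf_B"), (247, "Cap4_Leaf_B"), (42, "Cap4_Leaf_C"),
  (95, "Cap4_Leaf_C"), (96, "Cap4_Leaf_C"), (98, "Cap4_Leaf_C"), (99, "Cap4_Leaf_C"),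
  (100, "Cap4_Leaf_C"), (238, "Cap4_Leaf_C"), (239, "Cap4_Leaf_C"), (240, "Cap4_Leaf_C"),
  (241, "Cap4_Leaf_C"), (242, "Cap4_Leaf_C"), (7, "M_Cluster_4"), (10, "M_Cluster_4"),
  (18, "M_Cluster_4"), (127, "M_Cluster_4"), (131, "M_Cluster_4"), (134, "M_Cluster_4"),
  (143, "M_Cluster_4"), (146, "M_Cluster_4"), (158, "M_Cluster_4"), (165, "M_Cluster_4"),
  (178, "M_Cluster_4"), (183, "M_Cluster_4"), (185, "M_Cluster_4"), (191, "M_Cluster_4"),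
  (20, "Linker_5"), (23, "Linker_5"), (32, "Linker_5"), (35, "Linker_5"),
  (56, "Linker_5"), (59, "Linker_5"), (61, "Linker_5"), (62, "Linker_5"),
  (168, "Linker_5"), (171, "Linker_5"), (173, "Linker_5"), (174, "Linker_5"),
  (200, "Linker_5"), (203, "Linker_5"), (205, "Linker_5"), (206, "Linker_5"),
  (13, "Linker_6"), (14, "Linker_6"), (29, "Linker_6"), (30, "Linker_6"),
  (49, "Linker_6"), (50, "Linker_6"), (52, "Linker_6"), (55, "Linker_6"),
  (153, "Linker_6"), (154, "Linker_6"), (160, "Linker_6"), (163, "Linker_6"),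
  (193, "Linker_6"), (194, "Linker_6"), (196, "Linker_6"), (199, "Linker_6"),
  (21, "Linker_7"), (22, "Linker_7"), (33, "Linker_7"), (34, "Linker_7"),
  (57, "Linker_7"), (58, "Linker_7"), (60, "Linker_7"), (63, "Linker_7"),
  (169, "Linker_7"), (170, "Linker_7"), (172, "Linker_7"), (175, "Linker_7"),
  (201, "Linker_7"), (202, "Linker_7"), (204, "Linker_7"), (207, "Linker_7"),
  (12, "Linker_8"), (15, "Linker_8"), (28, "Linker_8"), (31, "Linker_8"),
  (48, "Linker_8"), (51, "Linker_8"), (53, "Linker_8"), (54, "Linker_8"),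
  (152, "Linker_8"), (155, "Linker_8"), (161, "Linker_8"), (162, "Linker_8"),
  (192, "Linker_8"), (195, "Linker_8"), (197, "Linker_8"), (198, "Linker_8")
]

def identifyMOF5Index_alt (frame : Int) (index : Int) : Option String :=
  (PySem.Dict.mk (if frame ≤ 121 then pvFlatEarly else pvFlatLate)).get? index

-- ===== PRECONDITION & SPEC =====
def Spec_identifyMOF5Index (frame : Int) (index : Int) (out : Option String) : Prop := out = identifyMOF5Index_alt frame index
instance (frame : Int) (index : Int) (out : Option String) : Decidable (Spec_identifyMOF5Index frame index out) := by unfold Spec_identifyMOF5Index; infer_instance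

-- ===== CLAIM =====
def Claim_equal_identifyMOF5Index : Prop := ∀ (frame : Int) (index : Int), Dom_identifyMOF5Index frame index → Spec_identifyMOF5Index frame index (identifyMOF5Index frame index)

-- ===== LEMMAS AND PROOFS =====

-- flatten a group table into (index, name) pairs, in first-match order
def pvFlatten (G : List (String × List Int)) : List (Int × String) :=
  G.flatMap (fun p => p.2.map (fun j => (j, p.1)))

theorem pvGet?_mk_append (L1 L2 : List (Int × String)) (i : Int) :
    (PySem.Dict.mk (L1 ++ L2)).get? i = ((PySem.Dict.mk L1).get? i).or ((PySem.Dict.mk L2).get? i) := by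
  induction L1 with
  | nil => simp [PySem.Dict.get?]
  | cons p rest ih =>
    obtain ⟨k, v⟩ := p
    rw [List.cons_append, PySem.Dict.get?_mk_cons, PySem.Dict.get?_mk_cons, ih]
    by_cases h : k = i
    · simp [h]
    · simp [h]

theorem pvGet?_mk_map (name : String) (ids : List Int) (i : Int) :
    (PySem.Dict.mk (ids.map (fun j => (j, name)))).get? i =
      (if ids.contains i then some name else none) := by
  induction ids with
  | nil => simp [PySem.Dict.get?]
  | cons j rest ih =>
    rw [List.map_cons, PySem.Dict.get?_mk_cons, ih]
    by_cases h : j = i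
    · simp [h]
    · simp [h, Ne.symm h]

theorem pvFirstMatch_flatten (G : List (String × List Int)) (i : Int) :
    (PySem.Dict.mk (pvFlatten G)).get? i = pvFirstMatch i G := by
  induction G with
  | nil => simp [pvFlatten, pvFirstMatch, PySem.Dict.get?]
  | cons p rest ih =>
    obtain ⟨name, ids⟩ := p
    rw [pvFlatten, List.flatMap_cons, pvGet?_mk_append, pvGet?_mk_map]
    simp only [pvFirstMatch]
    by_cases h : i ∈ ids
    · simp [h]
    · simpa [h, pvFlatten] using ih

set_option maxRecDepth 4096 in
theorem pvFlatEarly_eq : pvFlatEarly = pvFlatten pvGroupsEarly := by rfl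
set_option maxRecDepth 4096 in
theorem pvFlatLate_eq : pvFlatLate = pvFlatten pvGroupsLate := by rfl

-- ===== VERDICT =====
theorem identifyMOF5Index_spec : Claim_equal_identifyMOF5Index := by
  intro frame index _
  unfold Spec_identifyMOF5Index identifyMOF5Index identifyMOF5Index_alt
  by_cases h : frame ≤ 121
  · simp [h, pvFlatEarly_eq, pvFirstMatch_flatten]
  · have h2 : frame ≥ 122 := by omega
    simp [h, h2, pvFlatLate_eq, pvFirstMatch_flatten]
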